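-- pv_equiv track=rewrite | github.com/MaxwellCalkin/sentinel-ai | sentinel/context_guard.py | _has_leaking_substring
-- ===== SOURCE A (Python) =====
-- _MIN_LEAK_SUBSTRING_LENGTH = 21
--
-- def _has_leaking_substring(content_lower: str, prompt_lower: str) -> bool:
--     """Check whether any prompt substring longer than 20 chars appears in content."""
--     for start in range(len(prompt_lower)):
--         end = start + _MIN_LEAK_SUBSTRING_LENGTH
--         if end > len(prompt_lower):
--             break
--         if prompt_lower[start:end] in content_lower:
--             return True
--     return False
-- ===== SOURCE B (Python) =====
-- _MIN_LEAK_SUBSTRING_LENGTH = 21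
--
--
-- def _has_leaking_substring(content_lower: str, prompt_lower: str) -> bool:
--     """Check whether any prompt substring longer than 20 chars appears in content."""
--     L = _MIN_LEAK_SUBSTRING_LENGTH
--     if len(prompt_lower) < L:
--         return False
--     windows = set()
--     for i in range(len(content_lower) - L + 1):
--         windows.add(content_lower[i:i + L])
--     return any(prompt_lower[i:i + L] in windows
--                for i in range(len(prompt_lower) - L + 1))
-- ===== Notes on version B (the rewrite author's own statement) =====
-- stated objective: faster
-- what changed: Instead of scanning the whole content for each prompt window (substring search per start), B builds a hash set of all length-21 content windows once and probes each prompt window with an O(1) expected set lookup.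
import Mathlib
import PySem

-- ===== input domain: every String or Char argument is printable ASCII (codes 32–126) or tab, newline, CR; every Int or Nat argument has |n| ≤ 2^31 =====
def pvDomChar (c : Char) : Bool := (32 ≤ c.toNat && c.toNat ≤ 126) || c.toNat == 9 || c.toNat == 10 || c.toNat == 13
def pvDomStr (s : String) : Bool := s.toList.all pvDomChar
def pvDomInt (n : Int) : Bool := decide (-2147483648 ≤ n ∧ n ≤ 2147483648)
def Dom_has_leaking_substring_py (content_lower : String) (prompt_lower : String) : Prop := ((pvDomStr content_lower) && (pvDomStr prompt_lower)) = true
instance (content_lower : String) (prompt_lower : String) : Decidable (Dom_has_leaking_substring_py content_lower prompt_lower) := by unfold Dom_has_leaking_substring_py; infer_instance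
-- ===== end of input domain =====

-- B replaces A's per-start substring search over the whole content by a set of all
-- length-21 content windows built once, probed with each prompt window (objective: faster).

-- ===== PORT A =====
-- the for-loop of A over range(len(prompt_lower)), with the break and the early return
def hlsALoop (content prompt : List Char) : List Int → Bool
  | [] => false
  | start :: rest =>
    if start + 21 > (prompt.length : Int) then false
    else if PySem.Chars.isIn (PySem.List.slice prompt (some start) (some (start + 21))) content then true
    else hlsALoop content prompt rest

def has_leaking_substring_py (content_lower : String) (prompt_lower : String) : Bool :=
  hlsALoop content_lower.toList prompt_lower.toList
    (PySem.List.pyRange 0 (PySem.Str.len prompt_lower) 1)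

-- ===== PORT B =====
-- the set `windows` of all length-21 slices of content (B's first loop)
def hlsWindows (content : List Char) : PySem.Set (List Char) :=
  (PySem.List.pyRange 0 ((content.length : Int) - 21 + 1) 1).foldl
    (fun s i => PySem.Set.add s (PySem.List.slice content (some i) (some (i + 21)))) PySem.Set.empty

def has_leaking_substring_py_alt (content_lower : String) (prompt_lower : String) : Bool :=
  if PySem.Str.len prompt_lower < 21 then false
  else
    let windows := hlsWindows content_lower.toList
    (PySem.List.pyRange 0 (PySem.Str.len prompt_lower - 21 + 1) 1).any
      (fun i => PySem.Set.contains windows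
        (PySem.List.slice prompt_lower.toList (some i) (some (i + 21))))

-- ===== PRECONDITION & SPEC =====
def Spec_has_leaking_substring_py (content_lower : String) (prompt_lower : String) (out : Bool) : Prop := out = has_leaking_substring_py_alt content_lower prompt_lower
instance (content_lower : String) (prompt_lower : String) (out : Bool) : Decidable (Spec_has_leaking_substring_py content_lower prompt_lower out) := by unfold Spec_has_leaking_substring_py; infer_instance

-- ===== CLAIM (what is proved, stated in full; the proofs are below) =====
def Claim_equal_has_leaking_substring_py : Prop := ∀ (content_lower : String) (prompt_lower : String), Dom_has_leaking_substring_py content_lower prompt_lower → Spec_has_leaking_substring_py content_lower prompt_lower (has_leaking_substring_py content_lower prompt_lower)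

-- ===== LEMMAS AND PROOFS =====

-- a window of xs: the length-21 slice starting at natural index j
def hlsWin (xs : List Char) (j : Nat) : List Char := (xs.drop j).take 21

lemma hls_slice_nat (xs : List Char) (j : Nat) :
    PySem.List.slice xs (some (j : Int)) (some ((j : Int) + 21)) = hlsWin xs j := by
  have : ((j : Int) + 21) = ((j + 21 : Nat) : Int) := by push_cast; ring
  rw [this, PySem.List.slice_natCast, hlsWin]
  congr 1
  omega

-- a length-21 list is an infix of c iff it is one of c's length-21 windows
lemma hls_infix_iff_window (c w : List Char) (hw : w.length = 21) :
    w <:+: c ↔ ∃ j : Nat, j + 21 ≤ c.length ∧ w = hlsWin c j := by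
  constructor
  · rintro ⟨t, s, rfl⟩
    refine ⟨t.length, by simp; omega, ?_⟩
    simp [hlsWin, ← hw]
  · rintro ⟨j, hj, rfl⟩
    exact List.IsInfix.trans ((c.drop j).take_prefix 21).isInfix (c.drop_suffix j).isInfix

-- characterisation of A's loop over the tail range starting at a
lemma hlsALoop_iff (c p : List Char) (a : Nat) :
    hlsALoop c p (PySem.List.pyRange (a : Int) (p.length : Int) 1) = true ↔
      ∃ i : Nat, a ≤ i ∧ i + 21 ≤ p.length ∧ PySem.Chars.isIn (hlsWin p i) c = true := by
  by_cases ha : a < p.length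
  · rw [PySem.List.pyRange_one_cons (by exact_mod_cast ha)]
    show (if (a : Int) + 21 > (p.length : Int) then false
      else if PySem.Chars.isIn (PySem.List.slice p (some (a : Int)) (some ((a : Int) + 21))) c then true
      else hlsALoop c p (PySem.List.pyRange ((a : Int) + 1) (p.length : Int) 1)) = true ↔ _
    by_cases hb : a + 21 ≤ p.length
    · rw [if_neg (by omega), hls_slice_nat]
      by_cases hin : PySem.Chars.isIn (hlsWin p a) c = true
      · rw [if_pos hin]
        exact iff_of_true rfl ⟨a, le_refl a, hb, hin⟩
      · rw [if_neg hin, show ((a : Int) + 1) = ((a + 1 : Nat) : Int) by push_cast; ring,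
          hlsALoop_iff c p (a + 1)]
        constructor
        · rintro ⟨i, h1, h2, h3⟩; exact ⟨i, by omega, h2, h3⟩
        · rintro ⟨i, h1, h2, h3⟩
          refine ⟨i, ?_, h2, h3⟩
          rcases Nat.eq_or_lt_of_le h1 with h | h
          · exact absurd (h ▸ h3) hin
          · omega
    · rw [if_pos (by omega)]
      refine iff_of_false (by simp) ?_
      rintro ⟨i, h1, h2, _⟩; omega
  · rw [PySem.List.pyRange_one_eq_nil (by exact_mod_cast Nat.le_of_not_lt ha)]
    refine iff_of_false (by simp [hlsALoop]) ?_
    rintro ⟨i, h1, h2, _⟩; omega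
termination_by p.length - a

-- the window set is the set of all length-21 windows of c
lemma hls_mem_windows (c w : List Char) :
    PySem.Set.contains (hlsWindows c) w = true ↔
      ∃ j : Nat, j + 21 ≤ c.length ∧ w = hlsWin c j := by
  have hfold : hlsWindows c =
      PySem.Set.ofList ((PySem.List.pyRange 0 ((c.length : Int) - 21 + 1) 1).map
        (fun i => PySem.List.slice c (some i) (some (i + 21)))) := by
    rw [PySem.Set.ofList_eq_foldl, List.foldl_map]; rfl
  rw [hfold, PySem.Set.contains_iff, PySem.Set.mem_ofList, List.mem_map]
  constructor
  · rintro ⟨i, hi, rfl⟩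
    rw [PySem.List.mem_pyRange_one] at hi
    obtain ⟨h0, h1⟩ := hi
    lift i to Nat using h0 with j
    exact ⟨j, by omega, hls_slice_nat c j⟩
  · rintro ⟨j, hj, rfl⟩
    refine ⟨(j : Int), ?_, hls_slice_nat c j⟩
    rw [PySem.List.mem_pyRange_one]
    constructor <;> [positivity; omega]

-- characterisation of B's probing loop
lemma hls_alt_iff (c p : String) :
    has_leaking_substring_py_alt c p = true ↔
      ∃ i : Nat, i + 21 ≤ p.toList.length ∧
        PySem.Set.contains (hlsWindows c.toList) (hlsWin p.toList i) = true := by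
  unfold has_leaking_substring_py_alt
  simp only [PySem.Str.len_eq]
  by_cases h : (p.toList.length : Int) < 21
  · rw [if_pos h]
    refine iff_of_false (by simp) ?_
    rintro ⟨i, h1, _⟩; omega
  · rw [if_neg h, List.any_eq_true]
    constructor
    · rintro ⟨i, hi, hc⟩
      rw [PySem.List.mem_pyRange_one] at hi
      obtain ⟨h0, h1⟩ := hi
      lift i to Nat using h0 with j
      rw [hls_slice_nat] at hc
      exact ⟨j, by omega, hc⟩
    · rintro ⟨i, h1, hc⟩
      refine ⟨(i : Int), ?_, by rw [hls_slice_nat]; exact hc⟩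
      rw [PySem.List.mem_pyRange_one]
      constructor <;> [positivity; omega]

-- ===== VERDICT (by name: the statement is the Claim_ definition above) =====
theorem has_leaking_substring_py_spec : Claim_equal_has_leaking_substring_py := by
  intro c p _
  unfold Spec_has_leaking_substring_py
  have hA : has_leaking_substring_py c p = true ↔
      ∃ i : Nat, i + 21 ≤ p.toList.length ∧ PySem.Chars.isIn (hlsWin p.toList i) c.toList = true := by
    unfold has_leaking_substring_py
    simp only [PySem.Str.len_eq]
    have := hlsALoop_iff c.toList p.toList 0
    simp only [Nat.cast_zero] at this
    rw [this]
    exact ⟨fun ⟨i, _, h2, h3⟩ => ⟨i, h2, h3⟩, fun ⟨i, h2, h3⟩ => ⟨i, Nat.zero_le i, h2, h3⟩⟩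
  have hB := hls_alt_iff c p
  have hiff : has_leaking_substring_py c p = true ↔ has_leaking_substring_py_alt c p = true := by
    rw [hA, hB]
    apply exists_congr; intro i
    apply and_congr_right; intro hlen
    rw [hls_mem_windows, PySem.Chars.isIn_iff_infix,
        hls_infix_iff_window _ _ (by simp only [hlsWin, List.length_take, List.length_drop]; omega)]
  cases hAval : has_leaking_substring_py c p <;> cases hBval : has_leaking_substring_py_alt c p <;>
    simp_all
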